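-- pv_equiv track=rewrite | github.com/eggplantgf/CodingTestStudy | week2/wekk2_11.py | solution
-- ===== SOURCE A (Python) =====
-- def solution(rsp):
--     answer = ''
--     for i in rsp:
--         if i == '2':
--             answer += '0'
--         elif i == '0' :
--             answer += '5'
--         elif i == '5' :
--             answer += '2'
--         else:
--             break
--     return answer
-- ===== SOURCE B (Python) =====
-- import re
--
-- def solution(rsp):
--     prefix = re.match(r'[205]*', rsp).group()
--     return prefix.translate(str.maketrans('205', '052'))
-- ===== Notes on version B (the rewrite author's own statement) =====
-- stated objective: idiomatic
-- what changed: Replaces the per-character branch-and-break loop with an anchored regex that extracts the maximal leading run of '2'/'0'/'5' followed by one table-driven bulk substitution via str.translate.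
import Mathlib
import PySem

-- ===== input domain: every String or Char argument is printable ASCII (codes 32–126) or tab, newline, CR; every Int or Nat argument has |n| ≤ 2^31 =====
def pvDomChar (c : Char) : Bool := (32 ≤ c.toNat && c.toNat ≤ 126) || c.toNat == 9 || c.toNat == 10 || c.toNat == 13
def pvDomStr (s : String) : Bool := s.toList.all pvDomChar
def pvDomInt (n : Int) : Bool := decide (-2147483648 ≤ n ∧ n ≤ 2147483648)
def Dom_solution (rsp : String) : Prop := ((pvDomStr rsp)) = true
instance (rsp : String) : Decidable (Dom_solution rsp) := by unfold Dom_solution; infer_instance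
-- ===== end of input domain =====

-- ===== PORT A =====
-- per-character loop: append translated char, break on any other
def solutionChars : List Char → List Char
  | [] => []
  | c :: cs =>
    if c = '2' then '0' :: solutionChars cs
    else if c = '0' then '5' :: solutionChars cs
    else if c = '5' then '2' :: solutionChars cs
    else []

def solution (rsp : String) : String := String.ofList (solutionChars rsp.toList)

-- ===== PORT B =====
-- maximal leading run of [205] (regex match), then one bulk table substitution (translate)
def trTable (c : Char) : Char := if c = '2' then '0' else if c = '0' then '5' else '2'

def solution_alt (rsp : String) : String :=
  String.ofList (((rsp.toList.takeWhile (fun c => c = '2' ∨ c = '0' ∨ c = '5'))).map trTable)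

-- ===== PRECONDITION & SPEC =====
def Spec_solution (rsp : String) (out : String) : Prop := out = solution_alt rsp
instance (rsp : String) (out : String) : Decidable (Spec_solution rsp out) := by unfold Spec_solution; infer_instance

-- ===== CLAIM (what is proved, stated in full; the proofs are below) =====
def Claim_equal_solution : Prop := ∀ (rsp : String), Dom_solution rsp → Spec_solution rsp (solution rsp)

-- ===== LEMMAS AND PROOFS =====
theorem solutionChars_eq (l : List Char) :
    solutionChars l = (l.takeWhile (fun c => c = '2' ∨ c = '0' ∨ c = '5')).map trTable := by
  induction l with
  | nil => rfl
  | cons c cs ih =>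
    by_cases h2 : c = '2'
    · simp [solutionChars, h2, List.takeWhile, trTable, ih]
    · by_cases h0 : c = '0'
      · simp [solutionChars, h0, List.takeWhile, trTable, ih]
      · by_cases h5 : c = '5'
        · simp [solutionChars, h5, List.takeWhile, trTable, ih]
        · simp [solutionChars, h2, h0, h5, List.takeWhile]

-- ===== VERDICT (by name: the statement is the Claim_ definition above) =====
theorem solution_spec : Claim_equal_solution := by
  intro rsp _
  unfold Spec_solution solution solution_alt
  rw [solutionChars_eq]
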